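-- pv_equiv track=rewrite | github.com/boldloop/mondrian | mondrian.py | invalid
-- ===== SOURCE A (Python) =====
-- def check_terminus(const, v, opp_lines, limit):
--     if v in [0, limit]:
--         return True
--     else:
--         opp_with_v = [opp for opp in opp_lines if opp[0] == v]
--         for opp in opp_with_v:
--             c0, cf = opp[1]
--             if c0 < const < cf:
--                 return True
--     return False
--
-- def check_termini(line, opp_lines, limit):
--     const, (v0, vf) = line
--     response = [check_terminus(const, v, opp_lines, limit) for v in [v0, vf]]
--     return tuple(response)
--
-- def check_line(line, opp_lines, limit):
--     return all(check_termini(line, opp_lines, limit))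
--
-- def invalid(x_lines, y_lines, width, height):
--     for x_line in x_lines:
--         if not check_line(x_line, y_lines, width):
--             return True
--     for y_line in y_lines:
--         if not check_line(y_line, x_lines, height):
--             return True
--     return False
-- ===== SOURCE B (Python) =====
-- def invalid(x_lines, y_lines, width, height):
--     # Sort-based index: group opposing intervals by coordinate, sort each group by
--     # start and precompute running-max ends; each endpoint query is then a binary
--     # search (count of starts < q) plus one prefix-maximum comparison.
--     def build(lines):
--         groups = {}
--         for v, iv in lines:
--             groups.setdefault(v, []).append(iv)
--         index = {}
--         for v, ivs in groups.items():
--             ivs.sort(key=lambda iv: iv[0])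
--             starts = [iv[0] for iv in ivs]
--             maxends = []
--             m = None
--             for _, cf in ivs:
--                 if m is None or cf > m:
--                     m = cf
--                 maxends.append(m)
--             index[v] = (starts, maxends)
--         return index
--
--     def covered(index, v, q, limit):
--         if v == 0 or v == limit:
--             return True
--         if v not in index:
--             return False
--         starts, maxends = index[v]
--         lo, hi = 0, len(starts)
--         while lo < hi:  # hand-rolled bisect_left(starts, q)
--             mid = (lo + hi) // 2
--             if starts[mid] < q:
--                 lo = mid + 1
--             else:
--                 hi = mid
--         return lo > 0 and maxends[lo - 1] > q
--
--     def ok(lines, index, limit):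
--         return all(covered(index, v, c, limit)
--                    for c, (v0, vf) in lines for v in (v0, vf))
--
--     return not (ok(x_lines, build(y_lines), width)
--                 and ok(y_lines, build(x_lines), height))
-- ===== Notes on version B (the rewrite author's own statement) =====
-- stated objective: faster
-- what changed: B replaces A's per-endpoint linear filter of all opposing lines by a precomputed per-coordinate index whose groups are sorted by interval start with running-max ends, answering each endpoint query by a hand-rolled binary search plus one prefix-maximum comparison instead of scanning intervals.
import Mathlib
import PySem

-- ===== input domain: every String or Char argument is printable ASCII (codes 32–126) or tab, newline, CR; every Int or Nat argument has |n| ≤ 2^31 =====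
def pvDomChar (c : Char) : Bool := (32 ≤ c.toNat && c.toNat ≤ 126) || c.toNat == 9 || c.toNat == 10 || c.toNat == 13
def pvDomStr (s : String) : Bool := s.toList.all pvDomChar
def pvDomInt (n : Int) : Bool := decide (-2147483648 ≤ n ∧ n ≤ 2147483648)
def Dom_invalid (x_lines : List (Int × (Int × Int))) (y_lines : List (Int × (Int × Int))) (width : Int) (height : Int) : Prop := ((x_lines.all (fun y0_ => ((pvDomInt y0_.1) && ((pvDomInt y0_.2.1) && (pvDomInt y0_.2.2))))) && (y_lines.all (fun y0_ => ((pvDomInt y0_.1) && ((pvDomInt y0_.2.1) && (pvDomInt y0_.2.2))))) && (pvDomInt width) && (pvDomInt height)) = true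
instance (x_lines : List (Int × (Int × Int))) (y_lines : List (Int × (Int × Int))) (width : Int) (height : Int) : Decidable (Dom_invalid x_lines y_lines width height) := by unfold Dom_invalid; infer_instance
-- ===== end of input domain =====

-- B replaces A's per-endpoint linear scan of all opposing lines by a per-coordinate sorted
-- index (binary search over interval starts + running-max ends), objective: faster.

-- ===== PORT A =====
def check_terminus (const v : Int) (opp_lines : List (Int × (Int × Int))) (limit : Int) : Bool :=
  if v == 0 || v == limit then true
  else
    -- 'for opp in opp_with_v: … return True' = any over the filtered list
    ((opp_lines.filter (fun opp => opp.1 == v)).any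
      (fun opp => decide (opp.2.1 < const) && decide (const < opp.2.2)))

def check_termini (line : Int × (Int × Int)) (opp_lines : List (Int × (Int × Int))) (limit : Int) : Bool × Bool :=
  (check_terminus line.1 line.2.1 opp_lines limit, check_terminus line.1 line.2.2 opp_lines limit)

def check_line (line : Int × (Int × Int)) (opp_lines : List (Int × (Int × Int))) (limit : Int) : Bool :=
  (check_termini line opp_lines limit).1 && (check_termini line opp_lines limit).2

def invalid (x_lines : List (Int × (Int × Int))) (y_lines : List (Int × (Int × Int))) (width : Int) (height : Int) : Bool :=
  -- 'for … return True … return False' = any ‖ any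
  (x_lines.any (fun l => !check_line l y_lines width)) ||
  (y_lines.any (fun l => !check_line l x_lines height))

-- ===== PORT B =====
-- 'm = None; for _, cf in ivs: if m is None or cf > m: m = cf; maxends.append(m)'
def pvRunMax (ivs : List (Int × Int)) : List Int :=
  (ivs.foldl (fun (acc : List Int × Option Int) iv =>
      let m : Int := match acc.2 with
        | none => iv.2
        | some m0 => if iv.2 > m0 then iv.2 else m0
      (acc.1 ++ [m], some m)) ([], none)).1

-- build(lines): group by coordinate (setdefault/append), then per group: sort by start,
-- store (starts, running-max ends)
def pvBuild (lines : List (Int × (Int × Int))) : PySem.Dict Int (List Int × List Int) :=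
  let groups := lines.foldl (fun d p => d.modify p.1 [] (fun l => l ++ [p.2])) PySem.Dict.empty
  groups.items.foldl (fun idx p =>
    let s := PySem.List.sorted p.2 (fun iv => iv.1)
    idx.insert p.1 (s.map (fun iv => iv.1), pvRunMax s)) PySem.Dict.empty

-- each loop turn shrinks hi - lo by at least one, so hi - lo turns of fuel make the
-- 'while lo < hi' loop structural
def pvBisectGo : Nat → List Int → Int → Nat → Nat → Nat
  | 0, _, _, lo, _ => lo
  | fuel + 1, starts, q, lo, hi =>
    if lo < hi then
      let mid := (lo + hi) / 2
      if starts.getD mid 0 < q then pvBisectGo fuel starts q (mid + 1) hi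
      else pvBisectGo fuel starts q lo mid
    else lo

-- 'lo, hi = 0, len(starts); while lo < hi: mid = (lo+hi)//2; …' (hand-rolled bisect_left)
def pvBisect (starts : List Int) (q : Int) (lo hi : Nat) : Nat :=
  pvBisectGo (hi - lo) starts q lo hi

def pvCovered (index : PySem.Dict Int (List Int × List Int)) (v q limit : Int) : Bool :=
  if v == 0 || v == limit then true
  else
    match index.get? v with
    | none => false
    | some (starts, maxends) =>
      let lo := pvBisect starts q 0 starts.length
      decide (0 < lo) && decide (q < maxends.getD (lo - 1) 0)

def pvOk (lines : List (Int × (Int × Int))) (index : PySem.Dict Int (List Int × List Int)) (limit : Int) : Bool :=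
  lines.all (fun l => ([l.2.1, l.2.2]).all (fun v => pvCovered index v l.1 limit))

def invalid_alt (x_lines : List (Int × (Int × Int))) (y_lines : List (Int × (Int × Int))) (width : Int) (height : Int) : Bool :=
  !(pvOk x_lines (pvBuild y_lines) width && pvOk y_lines (pvBuild x_lines) height)

-- ===== PRECONDITION & SPEC =====
def Spec_invalid (x_lines : List (Int × (Int × Int))) (y_lines : List (Int × (Int × Int))) (width : Int) (height : Int) (out : Bool) : Prop := out = invalid_alt x_lines y_lines width height
instance (x_lines : List (Int × (Int × Int))) (y_lines : List (Int × (Int × Int))) (width : Int) (height : Int) (out : Bool) : Decidable (Spec_invalid x_lines y_lines width height out) := by unfold Spec_invalid; infer_instance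

-- ===== CLAIM (what is proved, stated in full; the proofs are below) =====
def Claim_equal_invalid : Prop := ∀ (x_lines : List (Int × (Int × Int))) (y_lines : List (Int × (Int × Int))) (width : Int) (height : Int), Dom_invalid x_lines y_lines width height → Spec_invalid x_lines y_lines width height (invalid x_lines y_lines width height)

-- ===== LEMMAS AND PROOFS =====

-- the running-max update step of B's inner loop
def rmStep (m : Option Int) (iv : Int × Int) : Int :=
  match m with | none => iv.2 | some m0 => if iv.2 > m0 then iv.2 else m0

-- B's maxends list, structurally
def rmAux : List (Int × Int) → Option Int → List Int
  | [], _ => []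
  | iv :: t, m => rmStep m iv :: rmAux t (some (rmStep m iv))

theorem pvRunMax_foldl :
    ∀ (t : List (Int × Int)) (acc : List Int) (m : Option Int),
      (t.foldl (fun (acc : List Int × Option Int) iv =>
        (acc.1 ++ [rmStep acc.2 iv], some (rmStep acc.2 iv))) (acc, m)).1 = acc ++ rmAux t m
  | [], acc, m => by simp [rmAux]
  | iv :: t, acc, m => by
      rw [List.foldl_cons]
      rw [pvRunMax_foldl t (acc ++ [rmStep m iv]) (some (rmStep m iv))]
      simp [rmAux]

theorem pvRunMax_eq_rmAux (t : List (Int × Int)) : pvRunMax t = rmAux t none := by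
  have h := pvRunMax_foldl t [] none
  rw [List.nil_append] at h
  exact h

theorem rmAux_lt_iff_some :
    ∀ (t : List (Int × Int)) (a : Int) (i : Nat), i < t.length → ∀ q : Int,
      (q < (rmAux t (some a)).getD i 0 ↔ q < a ∨ ∃ j, ∃ _hj : j < t.length, j ≤ i ∧ q < t[j].2)
  | iv :: t, a, 0, _, q => by
      have hM : (rmStep (some a) iv = iv.2 ∧ a ≤ iv.2) ∨ (rmStep (some a) iv = a ∧ iv.2 ≤ a) := by
        simp only [rmStep]; split_ifs <;> omega
      simp only [rmAux, List.getD_cons_zero]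
      constructor
      · intro h
        rcases hM with ⟨hm, _⟩ | ⟨hm, _⟩
        · exact Or.inr ⟨0, by simp, Nat.le_refl 0, by rw [List.getElem_cons_zero]; omega⟩
        · exact Or.inl (by omega)
      · rintro (h | ⟨j, hj, hj0, h⟩)
        · omega
        · have hj0' : j = 0 := Nat.le_zero.mp hj0
          subst hj0'
          rw [List.getElem_cons_zero] at h
          omega
  | iv :: t, a, i + 1, hi, q => by
      have hM : (rmStep (some a) iv = iv.2 ∧ a ≤ iv.2) ∨ (rmStep (some a) iv = a ∧ iv.2 ≤ a) := by
        simp only [rmStep]; split_ifs <;> omega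
      simp only [rmAux, List.getD_cons_succ]
      rw [rmAux_lt_iff_some t (rmStep (some a) iv) i
        (by simp only [List.length_cons] at hi; omega) q]
      constructor
      · rintro (h | ⟨j, hj, hji, h⟩)
        · rcases hM with ⟨hm, _⟩ | ⟨hm, _⟩
          · exact Or.inr ⟨0, by simp, by omega, by rw [List.getElem_cons_zero]; omega⟩
          · exact Or.inl (by omega)
        · exact Or.inr ⟨j + 1, by simp only [List.length_cons]; omega, by omega,
            by rw [List.getElem_cons_succ]; exact h⟩
      · rintro (h | ⟨j, hj, hji, h⟩)
        · exact Or.inl (by omega)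
        · cases j with
          | zero =>
            rw [List.getElem_cons_zero] at h
            exact Or.inl (by omega)
          | succ j =>
            rw [List.getElem_cons_succ] at h
            exact Or.inr ⟨j, by simp only [List.length_cons] at hj; omega, by omega, h⟩

theorem pvRunMax_lt_iff (t : List (Int × Int)) (q : Int) :
    ∀ i, i < t.length →
      (q < (pvRunMax t).getD i 0 ↔ ∃ j, ∃ _hj : j < t.length, j ≤ i ∧ q < t[j].2) := by
  intro i hi
  rw [pvRunMax_eq_rmAux]
  cases t with
  | nil => simp at hi
  | cons iv t =>
    have hstep : rmStep none iv = iv.2 := rfl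
    cases i with
    | zero =>
      simp only [rmAux, hstep, List.getD_cons_zero]
      constructor
      · intro h; exact ⟨0, by simp, Nat.le_refl 0, by rw [List.getElem_cons_zero]; omega⟩
      · rintro ⟨j, hj, hj0, h⟩
        have hj0' : j = 0 := Nat.le_zero.mp hj0
        subst hj0'
        rw [List.getElem_cons_zero] at h
        omega
    | succ i =>
      simp only [rmAux, hstep, List.getD_cons_succ]
      rw [rmAux_lt_iff_some t iv.2 i (by simp only [List.length_cons] at hi; omega) q]
      constructor
      · rintro (h | ⟨j, hj, hji, h⟩)
        · exact ⟨0, by simp, by omega, by rw [List.getElem_cons_zero]; omega⟩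
        · exact ⟨j + 1, by simp only [List.length_cons]; omega, by omega,
            by rw [List.getElem_cons_succ]; exact h⟩
      · rintro ⟨j, hj, hji, h⟩
        cases j with
        | zero =>
          rw [List.getElem_cons_zero] at h
          exact Or.inl (by omega)
        | succ j =>
          rw [List.getElem_cons_succ] at h
          exact Or.inr ⟨j, by simp only [List.length_cons] at hj; omega, by omega, h⟩

-- bisect invariant: on a nondecreasing list the loop lands on the split point of '< q'
theorem pvBisect_split (starts : List Int) (q : Int)
    (hs : starts.Pairwise (· ≤ ·)) :
    ∀ (fuel lo hi : Nat), hi - lo ≤ fuel → lo ≤ hi → hi ≤ starts.length →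
      (∀ j, j < lo → ∀ hj : j < starts.length, starts[j] < q) →
      (∀ j, hi ≤ j → ∀ hj : j < starts.length, q ≤ starts[j]) →
      lo ≤ pvBisectGo fuel starts q lo hi ∧ pvBisectGo fuel starts q lo hi ≤ hi ∧
      (∀ j, j < pvBisectGo fuel starts q lo hi → ∀ hj : j < starts.length, starts[j] < q) ∧
      (∀ j, pvBisectGo fuel starts q lo hi ≤ j → ∀ hj : j < starts.length, q ≤ starts[j]) := by
  intro fuel
  induction fuel with
  | zero =>
    intro lo hi hf hlh hhn hlow hhigh
    simp only [pvBisectGo]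
    exact ⟨Nat.le_refl _, hlh, hlow, fun j hj hjn => hhigh j (by omega) hjn⟩
  | succ n ih =>
    intro lo hi hf hlh hhn hlow hhigh
    by_cases h : lo < hi
    · simp only [pvBisectGo]
      rw [if_pos h]
      have hmidlt : (lo + hi) / 2 < starts.length := by omega
      have hget : starts.getD ((lo + hi) / 2) 0 = starts[(lo + hi) / 2] :=
        List.getD_eq_getElem starts 0 hmidlt
      by_cases hc : starts.getD ((lo + hi) / 2) 0 < q
      · rw [if_pos hc]
        rw [hget] at hc
        have hnewlow : ∀ j, j < (lo + hi) / 2 + 1 → ∀ hj : j < starts.length, starts[j] < q := by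
          intro j hj hjn
          rcases Nat.lt_or_ge j lo with hl | hl
          · exact hlow j hl hjn
          · rcases Nat.lt_or_eq_of_le (Nat.lt_succ_iff.mp hj) with hlt | heq
            · have hmono : starts[j] ≤ starts[(lo + hi) / 2] :=
                (List.pairwise_iff_getElem.mp hs) j ((lo + hi) / 2) hjn hmidlt hlt
              omega
            · subst heq; exact hc
        obtain ⟨h1, h2, h3, h4⟩ := ih ((lo + hi) / 2 + 1) hi (by omega) (by omega) hhn hnewlow hhigh
        exact ⟨by omega, h2, h3, h4⟩
      · rw [if_neg hc]
        rw [hget] at hc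
        have hq : q ≤ starts[(lo + hi) / 2] := by omega
        have hnewhigh : ∀ j, (lo + hi) / 2 ≤ j → ∀ hj : j < starts.length, q ≤ starts[j] := by
          intro j hj hjn
          rcases Nat.lt_or_eq_of_le hj with hlt | heq
          · exact le_trans hq ((List.pairwise_iff_getElem.mp hs) _ j hmidlt hjn hlt)
          · subst heq; exact hq
        obtain ⟨h1, h2, h3, h4⟩ := ih lo ((lo + hi) / 2) (by omega) (by omega) (by omega) hlow hnewhigh
        exact ⟨h1, by omega, h3, h4⟩
    · simp only [pvBisectGo]
      rw [if_neg h]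
      exact ⟨Nat.le_refl _, hlh, hlow, fun j hj hjn => hhigh j (by omega) hjn⟩

-- per-group: binary search + prefix max over the sorted group = linear any over the group
theorem group_covered (g : List (Int × Int)) (q : Int) :
    (decide (0 < pvBisect ((PySem.List.sorted g (fun iv => iv.1)).map (fun iv => iv.1)) q 0
        ((PySem.List.sorted g (fun iv => iv.1)).map (fun iv => iv.1)).length) &&
     decide (q < (pvRunMax (PySem.List.sorted g (fun iv => iv.1))).getD
        (pvBisect ((PySem.List.sorted g (fun iv => iv.1)).map (fun iv => iv.1)) q 0
          ((PySem.List.sorted g (fun iv => iv.1)).map (fun iv => iv.1)).length - 1) 0))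
    = g.any (fun iv => decide (iv.1 < q) && decide (q < iv.2)) := by
  have hperm : (PySem.List.sorted g (fun iv => iv.1)).Perm g :=
    PySem.List.sorted_perm g (fun iv => iv.1) false
  rw [← hperm.any_eq]
  have hpw : ((PySem.List.sorted g (fun iv => iv.1)).map (fun iv => iv.1)).Pairwise (· ≤ ·) :=
    List.pairwise_map.mpr (PySem.List.sorted_pairwise g (fun iv => iv.1))
  generalize hsd : PySem.List.sorted g (fun iv => iv.1) = s at *
  have hlen : (s.map (fun iv => iv.1)).length = s.length := by simp
  obtain ⟨-, hkle, hlt, hge⟩ := pvBisect_split (s.map (fun iv => iv.1)) q hpw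
    (s.map (fun iv => iv.1)).length 0 (s.map (fun iv => iv.1)).length
    (by omega) (by omega) (Nat.le_refl _)
    (fun j hj _ => absurd hj (Nat.not_lt_zero j))
    (fun j hj hjn => absurd hjn (by omega))
  have hbis : pvBisect (s.map (fun iv => iv.1)) q 0 (s.map (fun iv => iv.1)).length
      = pvBisectGo (s.map (fun iv => iv.1)).length (s.map (fun iv => iv.1)) q 0
        (s.map (fun iv => iv.1)).length := rfl
  rw [hbis]
  generalize hkd : pvBisectGo (s.map (fun iv => iv.1)).length (s.map (fun iv => iv.1)) q 0
      (s.map (fun iv => iv.1)).length = k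
  rw [hkd] at hkle hlt hge
  rw [Bool.eq_iff_iff]
  simp only [Bool.and_eq_true, decide_eq_true_eq, List.any_eq_true]
  constructor
  · rintro ⟨hk0, hmax⟩
    have hk1 : k - 1 < s.length := by omega
    obtain ⟨j, hj, hji, hq2⟩ := (pvRunMax_lt_iff s q (k - 1) hk1).mp hmax
    have hlt' : s[j].1 < q := by
      have h0 := hlt j (by omega) (by omega)
      simpa [List.getElem_map] using h0
    exact ⟨s[j], List.getElem_mem hj, hlt', hq2⟩
  · rintro ⟨x, hx, hx1, hx2⟩
    obtain ⟨j, hjlen, rfl⟩ := List.mem_iff_getElem.mp hx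
    have hjk : j < k := by
      by_contra hge'
      have hq : q ≤ (s.map (fun iv => iv.1))[j]'(by omega) := hge j (by omega) (by omega)
      rw [List.getElem_map] at hq
      omega
    exact ⟨by omega, (pvRunMax_lt_iff s q (k - 1) (by omega)).mpr ⟨j, hjlen, by omega, hx2⟩⟩

-- what B's index stores at coordinate v
def pvPrep (ivs : List (Int × Int)) : List Int × List Int :=
  ((PySem.List.sorted ivs (fun iv => iv.1)).map (fun iv => iv.1),
   pvRunMax (PySem.List.sorted ivs (fun iv => iv.1)))

theorem pvBuild_get? (lines : List (Int × (Int × Int))) (v : Int) :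
    (pvBuild lines).get? v =
      if (lines.filter (fun p => p.1 == v)).map (fun p => p.2) = [] then none
      else some (pvPrep ((lines.filter (fun p => p.1 == v)).map (fun p => p.2))) := by
  have hrfl : pvBuild lines =
      ((lines.foldl (fun d p => d.modify p.1 [] (fun l => l ++ [p.2])) PySem.Dict.empty).items.foldl
        (fun idx p => idx.insert p.1 (pvPrep p.2)) PySem.Dict.empty) := rfl
  have hnodupg : (lines.foldl (fun d p => d.modify p.1 [] (fun l => l ++ [p.2]))
      PySem.Dict.empty).keys.Nodup :=
    PySem.Dict.nodup_keys_foldl_modify_key lines (fun p => p.1) [] (fun _ p l => l ++ [p.2])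
      PySem.Dict.empty PySem.Dict.nodup_keys_empty
  have hgetD : (lines.foldl (fun d p => d.modify p.1 [] (fun l => l ++ [p.2]))
      PySem.Dict.empty).getD v [] = (lines.filter (fun p => p.1 == v)).map (fun p => p.2) := by
    simpa using PySem.Dict.getD_foldl_modify_append lines PySem.Dict.empty v
  have hmemkeys : v ∈ (lines.foldl (fun d p => d.modify p.1 [] (fun l => l ++ [p.2]))
      PySem.Dict.empty).keys ↔ v ∈ lines.map (fun p => p.1) := by
    rw [PySem.Dict.keys_foldl_modify_key lines (fun p => p.1) [] (fun _ p l => l ++ [p.2])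
      PySem.Dict.empty]
    simp [PySem.Set.mem_update, PySem.Dict.keys_empty]
  rw [hrfl]
  generalize hg : lines.foldl (fun d p => d.modify p.1 [] (fun l => l ++ [p.2]))
      PySem.Dict.empty = groups at hnodupg hgetD hmemkeys
  have hitems : (groups.items.foldl (fun idx p => idx.insert p.1 (pvPrep p.2))
      PySem.Dict.empty).items = groups.items.map (fun p => (p.1, pvPrep p.2)) := by
    rw [PySem.Dict.items_foldl_insert_fresh groups.items (fun p => p.1) (fun p => pvPrep p.2)
      PySem.Dict.empty (by intro a _; simp [pysem]) hnodupg]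
    rfl
  have hkeys : (groups.items.foldl (fun idx p => idx.insert p.1 (pvPrep p.2))
      PySem.Dict.empty).keys = groups.keys := by
    show (groups.items.foldl (fun idx p => idx.insert p.1 (pvPrep p.2))
      PySem.Dict.empty).items.map (fun p => p.1) = groups.items.map (fun p => p.1)
    rw [hitems, List.map_map]
    exact congrArg (fun f => List.map f groups.items) (funext fun p => rfl)
  have hnodupb : (groups.items.foldl (fun idx p => idx.insert p.1 (pvPrep p.2))
      PySem.Dict.empty).keys.Nodup := by
    rw [hkeys]; exact hnodupg
  by_cases hG : (lines.filter (fun p => p.1 == v)).map (fun p => p.2) = []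
  · rw [if_pos hG, PySem.Dict.get?_eq_none_iff_not_mem_keys, hkeys, hmemkeys]
    simp only [List.map_eq_nil_iff, List.filter_eq_nil_iff] at hG
    simp only [List.mem_map, not_exists]
    rintro p ⟨hp, hpv⟩
    exact hG p hp (by simp [hpv])
  · rw [if_neg hG]
    have hvmemg : v ∈ groups.keys := by
      rw [hmemkeys]
      obtain ⟨x, hx⟩ : ∃ x, x ∈ lines.filter (fun p => p.1 == v) := by
        cases hflt : lines.filter (fun p => p.1 == v) with
        | nil => rw [hflt] at hG; simp at hG
        | cons a t => exact ⟨a, List.mem_cons_self⟩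
      have hxf := List.mem_filter.mp hx
      exact List.mem_map.mpr ⟨x, hxf.1, by simpa using hxf.2⟩
    have hvmemg' : v ∈ groups.items.map (fun p => p.1) := hvmemg
    obtain ⟨pr, hpr, hfst⟩ := List.mem_map.mp hvmemg'
    have hpr' : (v, pr.2) ∈ groups.items := by rw [← hfst]; exact hpr
    have hivs : pr.2 = (lines.filter (fun p => p.1 == v)).map (fun p => p.2) := by
      have h1 := PySem.Dict.getD_of_mem_items groups hpr' hnodupg []
      rw [hgetD] at h1
      exact h1.symm
    have hpair : (v, pvPrep pr.2) ∈ (groups.items.foldl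
        (fun idx p => idx.insert p.1 (pvPrep p.2)) PySem.Dict.empty).items := by
      rw [hitems]
      exact List.mem_map.mpr ⟨pr, hpr, by rw [hfst]⟩
    rw [PySem.Dict.get?_of_mem_items _ hpair hnodupb, hivs]

theorem pvCovered_eq (opp : List (Int × (Int × Int))) (v q limit : Int) :
    pvCovered (pvBuild opp) v q limit = check_terminus q v opp limit := by
  unfold pvCovered check_terminus
  by_cases hv : (v == 0 || v == limit) = true
  · rw [if_pos hv, if_pos hv]
  · rw [if_neg hv, if_neg hv, pvBuild_get? opp v]
    by_cases hG : (opp.filter (fun p => p.1 == v)).map (fun p => p.2) = []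
    · rw [if_pos hG]
      have hflt : opp.filter (fun p => p.1 == v) = [] := by simpa using hG
      rw [hflt]
      rfl
    · rw [if_neg hG]
      simp only [pvPrep]
      have hg := group_covered ((opp.filter (fun p => p.1 == v)).map (fun p => p.2)) q
      rw [List.any_map] at hg
      exact hg

-- ===== VERDICT (by name: the statement is the Claim_ definition above) =====
theorem invalid_spec : Claim_equal_invalid := by
  intro x_lines y_lines width height _
  unfold Spec_invalid invalid invalid_alt pvOk
  have hcl : ∀ (l : Int × (Int × Int)) (opp : List (Int × (Int × Int))) (lim : Int),
      ([l.2.1, l.2.2]).all (fun v => check_terminus l.1 v opp lim) = check_line l opp lim := by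
    intro l opp lim
    simp [check_line, check_termini]
  simp only [pvCovered_eq, hcl]
  simp [List.any_eq_not_all_not]
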